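-- pv_equiv track=rewrite | github.com/winter1x/top-python | скайрим/optimize.py | get_effect_state
-- ===== SOURCE A (Python) =====
-- def get_effect_state(effects, positive_effects, negative_effects):
--     has_positive = any(effect in positive_effects for effect in effects)
--     has_negative = any(effect in negative_effects for effect in effects)
--
--     if has_positive and has_negative:
--         return 0
--     elif has_positive:
--         return 1
--     elif has_negative:
--         return -1
--     else:
--         return 0  # Если эффекты не определены как положительные или отрицательные
-- ===== SOURCE B (Python) =====
-- def get_effect_state(effects, positive_effects, negative_effects):
--     has_positive = False
--     has_negative = False
--     for effect in effects:
--         if not has_positive and effect in positive_effects: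
--             has_positive = True
--         if not has_negative and effect in negative_effects:
--             has_negative = True
--         if has_positive and has_negative:
--             return 0
--     if has_positive:
--         return 1
--     if has_negative:
--         return -1
--     return 0
-- ===== Notes on version B (the rewrite author's own statement) =====
-- stated objective: alternative
-- what changed: Replaces A's two separate any()-passes over effects with a single pass that maintains both flags and returns 0 early as soon as an effect of each kind has been seen.
import Mathlib
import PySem

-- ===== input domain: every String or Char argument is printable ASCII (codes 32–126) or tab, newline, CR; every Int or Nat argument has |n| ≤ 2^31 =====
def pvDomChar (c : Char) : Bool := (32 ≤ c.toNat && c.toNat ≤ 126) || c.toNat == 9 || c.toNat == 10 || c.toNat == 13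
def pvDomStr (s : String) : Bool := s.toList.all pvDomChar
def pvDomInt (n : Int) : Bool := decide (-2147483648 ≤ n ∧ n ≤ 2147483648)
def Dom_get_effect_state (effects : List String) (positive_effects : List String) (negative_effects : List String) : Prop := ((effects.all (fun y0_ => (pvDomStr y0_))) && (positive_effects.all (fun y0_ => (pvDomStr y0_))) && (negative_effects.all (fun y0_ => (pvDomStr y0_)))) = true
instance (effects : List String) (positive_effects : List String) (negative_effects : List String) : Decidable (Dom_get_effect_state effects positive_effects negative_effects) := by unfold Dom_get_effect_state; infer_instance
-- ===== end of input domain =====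

-- B replaces A's two any()-scans over effects with ONE pass keeping both flags and an early return; same value everywhere (alternative decomposition, no speed claim).

-- ===== PORT A =====
def get_effect_state (effects : List String) (positive_effects : List String) (negative_effects : List String) : Int :=
  let has_positive := effects.any (fun e => positive_effects.contains e)
  let has_negative := effects.any (fun e => negative_effects.contains e)
  if has_positive && has_negative then 0
  else if has_positive then 1
  else if has_negative then -1
  else 0

-- ===== PORT B =====
def geStateLoop (pos neg : List String) : List String → Bool → Bool → Int
  | [], hp, hn => if hp then 1 else if hn then -1 else 0
  | e :: rest, hp, hn =>
    let hp' := if !hp && pos.contains e then true else hp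
    let hn' := if !hn && neg.contains e then true else hn
    if hp' && hn' then 0 else geStateLoop pos neg rest hp' hn'

def get_effect_state_alt (effects : List String) (positive_effects : List String) (negative_effects : List String) : Int :=
  geStateLoop positive_effects negative_effects effects false false

-- ===== PRECONDITION & SPEC =====
def Spec_get_effect_state (effects : List String) (positive_effects : List String) (negative_effects : List String) (out : Int) : Prop := out = get_effect_state_alt effects positive_effects negative_effects
instance (effects : List String) (positive_effects : List String) (negative_effects : List String) (out : Int) : Decidable (Spec_get_effect_state effects positive_effects negative_effects out) := by unfold Spec_get_effect_state; infer_instance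

-- ===== CLAIM (what is proved, stated in full; the proofs are below) =====
def Claim_equal_get_effect_state : Prop := ∀ (effects : List String) (positive_effects : List String) (negative_effects : List String), Dom_get_effect_state effects positive_effects negative_effects → Spec_get_effect_state effects positive_effects negative_effects (get_effect_state effects positive_effects negative_effects)

-- ===== LEMMAS AND PROOFS =====

-- loop invariant: the one-pass loop computes A's 4-way classification of the accumulated flags
theorem geStateLoop_eq (pos neg : List String) (l : List String) (hp hn : Bool)
    (h : (hp && hn) = false) :
    geStateLoop pos neg l hp hn =
      (if (hp || l.any (fun e => pos.contains e)) && (hn || l.any (fun e => neg.contains e)) then 0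
       else if hp || l.any (fun e => pos.contains e) then 1
       else if hn || l.any (fun e => neg.contains e) then -1
       else 0) := by
  induction l generalizing hp hn with
  | nil => cases hp <;> cases hn <;> simp_all [geStateLoop]
  | cons e rest ih =>
    cases hpe : pos.contains e <;> cases hne : neg.contains e <;>
      cases hp <;> cases hn <;> simp_all [geStateLoop]

-- ===== VERDICT (by name: the statement is the Claim_ definition above) =====
theorem get_effect_state_spec : Claim_equal_get_effect_state := by
  intro effects pos neg _
  show _ = _
  simp only [get_effect_state, get_effect_state_alt, geStateLoop_eq pos neg effects false false rfl, Bool.false_or]
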